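-- pv_equiv track=rewrite | github.com/YJGoodbye2024/HumanLLM | Code/gen_scenario_conversation_multi_patterns.py | _clean_section_text
-- ===== SOURCE A (Python) =====
-- def _clean_section_text(text: str) -> str:
--     """Trim whitespace and drop common markdown separators from a section."""
--     separator_lines = {"---", "***", "___"}
--     lines = text.splitlines()
--     start = 0
--     end = len(lines)
--
--     while start < end and not lines[start].strip():
--         start += 1
--     while end > start and not lines[end - 1].strip():
--         end -= 1
--
--     while start < end and lines[start].strip() in separator_lines:
--         start += 1
--         while start < end and not lines[start].strip():
--             start += 1
--
--     while end > start and lines[end - 1].strip() in separator_lines: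
--         end -= 1
--         while end > start and not lines[end - 1].strip():
--             end -= 1
--
--     return "\n".join(lines[start:end]).strip()
-- ===== SOURCE B (Python) =====
-- def _clean_section_text(text: str) -> str:
--     """Trim whitespace and drop common markdown separators from a section."""
--     separator_lines = {"---", "***", "___"}
--
--     def is_content(line):
--         s = line.strip()
--         return bool(s) and s not in separator_lines
--
--     lines = text.splitlines()
--     content = [i for i, line in enumerate(lines) if is_content(line)]
--     if not content:
--         return ""
--     return "\n".join(lines[content[0]:content[-1] + 1]).strip()
-- ===== Notes on version B (the rewrite author's own statement) =====
-- stated objective: simpler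
-- what changed: Replaces A's four mutually nested edge-scanning pointer loops with one content-line predicate, a single comprehension collecting content-line indices, and one slice from the first to the last such index.
import Mathlib
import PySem

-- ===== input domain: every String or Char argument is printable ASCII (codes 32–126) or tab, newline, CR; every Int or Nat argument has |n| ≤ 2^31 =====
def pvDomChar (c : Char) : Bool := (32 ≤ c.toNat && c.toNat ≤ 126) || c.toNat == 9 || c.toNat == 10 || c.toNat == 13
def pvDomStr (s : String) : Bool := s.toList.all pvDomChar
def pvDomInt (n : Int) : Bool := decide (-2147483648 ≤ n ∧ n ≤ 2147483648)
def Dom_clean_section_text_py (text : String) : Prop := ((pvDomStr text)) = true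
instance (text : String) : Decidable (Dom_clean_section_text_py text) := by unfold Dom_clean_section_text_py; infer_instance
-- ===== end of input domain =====

-- B trims the section with one content-line predicate, an index comprehension and a single
-- slice from the first to the last content line, replacing A's four edge-scanning pointer loops (objective: simpler).

-- ===== PORT A =====
-- separator_lines = {"---", "***", "___"}  (used only for membership tests, so kept as the literal list)

def pvSeps : List String := ["---", "***", "___"]
def pvBlankF (lines : List String) (s e : Nat) : Nat :=
  if s < e ∧ PySem.Str.strip (lines.getD s "") = "" then pvBlankF lines (s + 1) e else s
termination_by e - s
def pvBlankB (lines : List String) (s e : Nat) : Nat :=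
  if e > s ∧ PySem.Str.strip (lines.getD (e - 1) "") = "" then pvBlankB lines s (e - 1) else e
termination_by e
theorem pvBlankF_ge (lines : List String) (s e : Nat) : s ≤ pvBlankF lines s e := by
  fun_induction pvBlankF lines s e with
  | case1 h ih => omega
  | case2 h => omega
theorem pvBlankB_le (lines : List String) (s e : Nat) : pvBlankB lines s e ≤ e := by
  fun_induction pvBlankB lines s e with
  | case1 h ih => omega
  | case2 h => omega
def pvSepF (lines : List String) (s e : Nat) : Nat :=
  if s < e ∧ pvSeps.contains (PySem.Str.strip (lines.getD s "")) then
    pvSepF lines (pvBlankF lines (s + 1) e) e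
  else s
termination_by e - s
decreasing_by have := pvBlankF_ge lines (s + 1) e; omega
def pvSepB (lines : List String) (s e : Nat) : Nat :=
  if e > s ∧ pvSeps.contains (PySem.Str.strip (lines.getD (e - 1) "")) then
    pvSepB lines s (pvBlankB lines s (e - 1))
  else e
termination_by e
decreasing_by have := pvBlankB_le lines s (e - 1); omega

def clean_section_text_py (text : String) : String :=
  let lines := PySem.Str.splitlines text
  let start0 := 0
  let end0 := lines.length
  let start1 := pvBlankF lines start0 end0
  let end1 := pvBlankB lines start1 end0
  let start2 := pvSepF lines start1 end1
  let end2 := pvSepB lines start2 end1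
  PySem.Str.strip (PySem.Str.join "\n"
    (PySem.List.slice lines (some (start2 : Int)) (some (end2 : Int))))

-- ===== PORT B =====
-- is_content(line): s = line.strip(); bool(s) and s not in separator_lines
def pvIsContent (line : String) : Bool :=
  !(PySem.Str.strip line == "") && !(pvSeps.contains (PySem.Str.strip line))

def clean_section_text_py_alt (text : String) : String :=
  let lines := PySem.Str.splitlines text
  let content : List Int :=
    ((PySem.List.enumerate lines 0).filter (fun p => pvIsContent p.2)).map (·.1)
  match content with
  | [] => ""
  | f :: rest =>
      PySem.Str.strip (PySem.Str.join "\n"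
        (PySem.List.slice lines (some f) (some ((f :: rest).getLast (by simp) + 1))))

-- ===== PRECONDITION & SPEC =====
def Spec_clean_section_text_py (text : String) (out : String) : Prop := out = clean_section_text_py_alt text
instance (text : String) (out : String) : Decidable (Spec_clean_section_text_py text out) := by unfold Spec_clean_section_text_py; infer_instance

-- ===== CLAIM (what is proved, stated in full; the proofs are below) =====
def Claim_equal_clean_section_text_py : Prop := ∀ (text : String), Dom_clean_section_text_py text → Spec_clean_section_text_py text (clean_section_text_py text)

-- ===== LEMMAS AND PROOFS =====


def pvTriv (lines : List String) (i : Nat) : Prop :=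
  PySem.Str.strip (lines.getD i "") = "" ∨ pvSeps.contains (PySem.Str.strip (lines.getD i "")) = true

theorem pvBlankF_le (lines : List String) (s e : Nat) (h : s ≤ e) : pvBlankF lines s e ≤ e := by
  fun_induction pvBlankF lines s e with
  | case1 s h1 ih => exact ih (by omega)
  | case2 s h1 => omega

theorem pvBlankF_blank (lines : List String) (s e : Nat) :
    ∀ i, s ≤ i → i < pvBlankF lines s e → PySem.Str.strip (lines.getD i "") = "" := by
  fun_induction pvBlankF lines s e with
  | case1 s h1 ih =>
    intro i hi hlt
    rcases Nat.eq_or_lt_of_le hi with rfl | hlt2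
    · exact h1.2
    · exact ih i hlt2 hlt
  | case2 s h1 => intro i hi hlt; omega

theorem pvBlankF_stop (lines : List String) (s e : Nat) :
    pvBlankF lines s e < e → PySem.Str.strip (lines.getD (pvBlankF lines s e) "") ≠ "" := by
  fun_induction pvBlankF lines s e with
  | case1 s h1 ih => exact ih
  | case2 s h1 => intro hlt; tauto

theorem pvBlankB_ge (lines : List String) (s e : Nat) (h : s ≤ e) : s ≤ pvBlankB lines s e := by
  fun_induction pvBlankB lines s e with
  | case1 e h1 ih => exact ih (by omega)
  | case2 e h1 => omega

theorem pvBlankB_blank (lines : List String) (s e : Nat) :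
    ∀ i, pvBlankB lines s e ≤ i → i < e → PySem.Str.strip (lines.getD i "") = "" := by
  fun_induction pvBlankB lines s e with
  | case1 e h1 ih =>
    intro i hi hlt
    rcases Nat.eq_or_lt_of_le (Nat.le_sub_one_of_lt hlt) with heq | hlt2
    · rw [← heq] at h1; exact h1.2
    · exact ih i hi (by omega)
  | case2 e h1 => intro i hi hlt; omega

theorem pvBlankB_stop (lines : List String) (s e : Nat) :
    s < pvBlankB lines s e → PySem.Str.strip (lines.getD (pvBlankB lines s e - 1) "") ≠ "" := by
  fun_induction pvBlankB lines s e with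
  | case1 e h1 ih => exact ih
  | case2 e h1 => intro hlt; tauto

theorem pvSepF_ge (lines : List String) (s e : Nat) : s ≤ pvSepF lines s e := by
  fun_induction pvSepF lines s e with
  | case1 s h1 ih => have := pvBlankF_ge lines (s + 1) e; omega
  | case2 s h1 => omega

theorem pvSepF_le (lines : List String) (s e : Nat) (h : s ≤ e) : pvSepF lines s e ≤ e := by
  fun_induction pvSepF lines s e with
  | case1 s h1 ih => exact ih (pvBlankF_le lines (s+1) e (by omega))
  | case2 s h1 => omega

theorem pvSepF_triv (lines : List String) (s e : Nat) :
    ∀ i, s ≤ i → i < pvSepF lines s e → pvTriv lines i := by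
  fun_induction pvSepF lines s e with
  | case1 s h1 ih =>
    intro i hi hlt
    rcases Nat.eq_or_lt_of_le hi with rfl | hlt2
    · exact Or.inr h1.2
    · by_cases hb : i < pvBlankF lines (s+1) e
      · exact Or.inl (pvBlankF_blank lines (s+1) e i hlt2 hb)
      · exact ih i (by omega) hlt
  | case2 s h1 => intro i hi hlt; omega

theorem pvSepF_stop (lines : List String) (s e : Nat)
    (hs : s < e → PySem.Str.strip (lines.getD s "") ≠ "") :
    pvSepF lines s e < e → ¬ pvTriv lines (pvSepF lines s e) := by
  fun_induction pvSepF lines s e with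
  | case1 s h1 ih => exact ih (pvBlankF_stop lines (s+1) e)
  | case2 s h1 =>
    intro hlt htriv
    rcases htriv with hb | hsep
    · exact hs hlt hb
    · exact h1 ⟨hlt, hsep⟩

theorem pvSepB_le (lines : List String) (s e : Nat) : pvSepB lines s e ≤ e := by
  fun_induction pvSepB lines s e with
  | case1 e h1 ih => have := pvBlankB_le lines s (e - 1); omega
  | case2 e h1 => omega

theorem pvSepB_ge (lines : List String) (s e : Nat) (h : s ≤ e) : s ≤ pvSepB lines s e := by
  fun_induction pvSepB lines s e with
  | case1 e h1 ih => exact ih (pvBlankB_ge lines s (e-1) (by omega))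
  | case2 e h1 => omega

theorem pvSepB_triv (lines : List String) (s e : Nat) :
    ∀ i, pvSepB lines s e ≤ i → i < e → pvTriv lines i := by
  fun_induction pvSepB lines s e with
  | case1 e h1 ih =>
    intro i hi hlt
    rcases Nat.eq_or_lt_of_le (Nat.le_sub_one_of_lt hlt) with heq | hlt2
    · rw [← heq] at h1; exact Or.inr h1.2
    · by_cases hb : pvBlankB lines s (e-1) ≤ i
      · exact Or.inl (pvBlankB_blank lines s (e-1) i hb (by omega))
      · exact ih i hi (by omega)
  | case2 e h1 => intro i hi hlt; omega

theorem pvSepB_stop (lines : List String) (s e : Nat)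
    (hs : s < e → PySem.Str.strip (lines.getD (e - 1) "") ≠ "") :
    s < pvSepB lines s e → ¬ pvTriv lines (pvSepB lines s e - 1) := by
  fun_induction pvSepB lines s e with
  | case1 e h1 ih => exact ih (pvBlankB_stop lines s (e-1))
  | case2 e h1 =>
    intro hlt htriv
    rcases htriv with hb | hsep
    · exact hs hlt hb
    · exact h1 ⟨hlt, hsep⟩

theorem pvContent_mem (lines : List String) (x : Int) :
    x ∈ ((PySem.List.enumerate lines 0).filter (fun p => pvIsContent p.2)).map (·.1) ↔
      ∃ k : Nat, k < lines.length ∧ x = (k : Int) ∧ ¬ pvTriv lines k := by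
  simp only [List.mem_map, List.mem_filter, PySem.List.mem_enumerate_iff]
  constructor
  · rintro ⟨p, ⟨⟨k, hk, rfl⟩, hc⟩, rfl⟩
    refine ⟨k, hk, by simp, ?_⟩
    simp only [pvIsContent, pvTriv, List.getD_eq_getElem lines "" hk] at hc ⊢
    simp only [Bool.and_eq_true, Bool.not_eq_true', beq_eq_false_iff_ne] at hc
    rcases hc with ⟨h1, h2⟩
    rw [not_or]
    exact ⟨h1, by simpa using h2⟩
  · rintro ⟨k, hk, rfl, hnt⟩
    refine ⟨((k : Int), lines[k]), ⟨⟨k, hk, by simp⟩, ?_⟩, rfl⟩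
    simp only [pvIsContent, pvTriv, List.getD_eq_getElem lines "" hk] at hnt ⊢
    rw [not_or] at hnt
    simp only [Bool.and_eq_true, Bool.not_eq_true', beq_eq_false_iff_ne]
    exact ⟨hnt.1, by simpa using hnt.2⟩

theorem pvContent_pairwise (lines : List String) :
    (((PySem.List.enumerate lines 0).filter (fun p => pvIsContent p.2)).map (·.1)).Pairwise (· < ·) := by
  refine List.Pairwise.map _ (fun a b h => h) ?_
  exact (PySem.List.pairwise_lt_enumerate lines 0).filter _

theorem pvLe_getLast {l : List Int} (h : l.Pairwise (· < ·)) (hne : l ≠ []) :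
    ∀ x ∈ l, x ≤ l.getLast hne := by
  induction l with
  | nil => simp
  | cons a t ih =>
    rcases List.pairwise_cons.mp h with ⟨ha, ht⟩
    intro x hx
    rcases List.mem_cons.mp hx with rfl | hx
    · cases t with
      | nil => simp
      | cons b t' =>
        rw [List.getLast_cons (by simp)]
        exact le_of_lt (ha _ (List.getLast_mem _))
    · cases t with
      | nil => simp at hx
      | cons b t' =>
        rw [List.getLast_cons (by simp)]
        exact ih ht (by simp) x hx

theorem pvMain (lines : List String) :
    (let start1 := pvBlankF lines 0 lines.length
     let end1 := pvBlankB lines start1 lines.length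
     let start2 := pvSepF lines start1 end1
     let end2 := pvSepB lines start2 end1
     PySem.Str.strip (PySem.Str.join "\n"
       (PySem.List.slice lines (some (start2 : Int)) (some (end2 : Int)))))
    =
    (let content : List Int :=
       ((PySem.List.enumerate lines 0).filter (fun p => pvIsContent p.2)).map (·.1)
     match content with
     | [] => ""
     | f :: rest =>
         PySem.Str.strip (PySem.Str.join "\n"
           (PySem.List.slice lines (some f) (some ((f :: rest).getLast (by simp) + 1))))) := by
  dsimp only
  set n := lines.length with hn
  set s1 := pvBlankF lines 0 n with hs1
  set e1 := pvBlankB lines s1 n with he1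
  set s2 := pvSepF lines s1 e1 with hs2
  set e2 := pvSepB lines s2 e1 with he2
  have hs1n : s1 ≤ n := pvBlankF_le lines 0 n (Nat.zero_le n)
  have hs1e1 : s1 ≤ e1 := pvBlankB_ge lines s1 n hs1n
  have he1n : e1 ≤ n := pvBlankB_le lines s1 n
  have hs1s2 : s1 ≤ s2 := pvSepF_ge lines s1 e1
  have hs2e1 : s2 ≤ e1 := pvSepF_le lines s1 e1 hs1e1
  have hs2e2 : s2 ≤ e2 := pvSepB_ge lines s2 e1 hs2e1
  have he2e1 : e2 ≤ e1 := pvSepB_le lines s2 e1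
  have hpre : ∀ i, i < s2 → pvTriv lines i := by
    intro i hi
    by_cases h : i < s1
    · exact Or.inl (pvBlankF_blank lines 0 n i (Nat.zero_le i) h)
    · exact pvSepF_triv lines s1 e1 i (by omega) hi
  have hsuf : ∀ i, e2 ≤ i → i < n → pvTriv lines i := by
    intro i h1 h2
    by_cases h : e1 ≤ i
    · exact Or.inl (pvBlankB_blank lines s1 n i h h2)
    · exact pvSepB_triv lines s2 e1 i h1 (by omega)
  have hstopF : s2 < e1 → ¬ pvTriv lines s2 :=
    pvSepF_stop lines s1 e1 (fun h => pvBlankF_stop lines 0 n (by omega))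
  have hstopB : s2 < e2 → ¬ pvTriv lines (e2 - 1) :=
    pvSepB_stop lines s2 e1 (fun h => pvBlankB_stop lines s1 n (by omega))
  have hmem := pvContent_mem lines
  cases h : ((PySem.List.enumerate lines 0).filter (fun p => pvIsContent p.2)).map (·.1) with
  | nil =>
    have halltriv : ∀ k, k < n → pvTriv lines k := by
      intro k hk
      by_contra hnt
      have := (hmem (k : Int)).mpr ⟨k, hk, rfl, hnt⟩
      rw [h] at this
      simp at this
    have hse : e2 - s2 = 0 := by
      rcases Nat.eq_or_lt_of_le hs2e2 with heq | hlt
      · omega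
      · exact absurd (halltriv s2 (by omega)) (hstopF (by omega))
    rw [PySem.List.slice_natCast, hse]
    rfl
  | cons f rest =>
    have hpw := pvContent_pairwise lines
    rw [h] at hpw
    have hfmem : f ∈ ((PySem.List.enumerate lines 0).filter (fun p => pvIsContent p.2)).map (·.1) := by
      rw [h]; simp
    obtain ⟨kf, hkf, hfeq, hkfnt⟩ := (hmem f).mp hfmem
    have hs2kf : s2 ≤ kf := by
      by_contra hc
      exact hkfnt (hpre kf (by omega))
    have hkfe2 : kf < e2 := by
      by_contra hc
      exact hkfnt (hsuf kf (by omega) hkf)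
    have hs2e2' : s2 < e2 := by omega
    have hnts2 : ¬ pvTriv lines s2 := hstopF (by omega)
    have hs2C : ((s2 : Nat) : Int) ∈ f :: rest := by
      rw [← h]; exact (hmem _).mpr ⟨s2, by omega, rfl, hnts2⟩
    have hfle : f ≤ ((s2 : Nat) : Int) := by
      rcases List.mem_cons.mp hs2C with heq | hmem2
      · omega
      · exact le_of_lt ((List.pairwise_cons.mp hpw).1 _ hmem2)
    have hf_eq : f = ((s2 : Nat) : Int) := by omega
    have hLmem : (f :: rest).getLast (by simp) ∈ ((PySem.List.enumerate lines 0).filter (fun p => pvIsContent p.2)).map (·.1) := by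
      rw [h]; exact List.getLast_mem _
    obtain ⟨kL, hkL, hLeq, hkLnt⟩ := (hmem _).mp hLmem
    have hkLe2 : kL < e2 := by
      by_contra hc
      exact hkLnt (hsuf kL (by omega) hkL)
    have hnt2 : ¬ pvTriv lines (e2 - 1) := hstopB hs2e2'
    have hmem2 : (((e2 - 1 : Nat)) : Int) ∈ f :: rest := by
      rw [← h]; exact (hmem _).mpr ⟨e2 - 1, by omega, rfl, hnt2⟩
    have hLge : (((e2 - 1 : Nat)) : Int) ≤ (f :: rest).getLast (by simp) :=
      pvLe_getLast hpw (by simp) _ hmem2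
    have hL_eq : (f :: rest).getLast (by simp) + 1 = ((e2 : Nat) : Int) := by
      have h1 : kL ≤ e2 - 1 := by omega
      push_cast at hLeq hLge ⊢
      omega
    have hgoal : PySem.List.slice lines (some ((s2 : Nat) : Int)) (some ((e2 : Nat) : Int)) =
        PySem.List.slice lines (some f) (some ((f :: rest).getLast (by simp) + 1)) := by
      rw [hL_eq, hf_eq]
    exact congrArg (fun l => PySem.Str.strip (PySem.Str.join "\n" l)) hgoal

-- ===== VERDICT (by name: the statement is the Claim_ definition above) =====
theorem clean_section_text_py_spec : Claim_equal_clean_section_text_py := by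
  intro text _
  unfold Spec_clean_section_text_py clean_section_text_py clean_section_text_py_alt
  exact pvMain (PySem.Str.splitlines text)
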